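-- pv_equiv track=rewrite | github.com/BidoOBido/beecrowd | python/COMPLETOS/1024.py | terceiro
-- ===== SOURCE A (Python) =====
-- import math
--
-- def terceiro(frase):
--     retorno = []
--     for f in range(len(frase)):
--         if f >= math.trunc(len(frase)/2):
--             retorno.append(chr((ord(frase[f]) - 1)))
--         else:
--             retorno.append(frase[f])
--
--     return retorno
-- ===== SOURCE B (Python) =====
-- def terceiro(frase):
--     # shift every character down by one, then restore the untouched first half
--     retorno = [chr(ord(c) - 1) for c in frase]
--     for i in range(len(frase) // 2):
--         retorno[i] = frase[i]
--     return retorno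
-- ===== Notes on version B (the rewrite author's own statement) =====
-- stated objective: alternative
-- what changed: Instead of one branching index loop deciding per element whether to shift, B first shifts ALL characters in a comprehension pass and then overwrites the first half with the original characters in a second loop, so no per-element midpoint comparison or math.trunc call is made.
import Mathlib
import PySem

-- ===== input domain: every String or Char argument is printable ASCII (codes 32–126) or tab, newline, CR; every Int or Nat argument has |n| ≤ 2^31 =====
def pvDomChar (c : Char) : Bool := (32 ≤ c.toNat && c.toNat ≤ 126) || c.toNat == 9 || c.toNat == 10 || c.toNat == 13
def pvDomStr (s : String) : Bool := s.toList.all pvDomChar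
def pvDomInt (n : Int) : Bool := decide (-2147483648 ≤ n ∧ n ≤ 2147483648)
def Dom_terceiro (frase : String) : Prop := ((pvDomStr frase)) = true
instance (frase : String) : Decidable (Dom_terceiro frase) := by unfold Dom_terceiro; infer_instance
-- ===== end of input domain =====

-- B shifts EVERY character in a first full pass and then overwrites the first half with the
-- original characters in a second pass, instead of A's single index loop with a per-element
-- midpoint test; objective: alternative (same cost, different strategy).


-- ===== PORT A =====
-- literal port of A: index loop over range(len(frase)), appending per element,
-- with the per-element test f >= trunc(len/2) (= len // 2 for nonnegative len)
def terceiro (frase : String) : List String :=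
  let cs := frase.toList
  let n : Int := cs.length
  (PySem.List.pyRange 0 n 1).foldl (fun retorno f =>
    if f ≥ PySem.Int.floordiv n 2 then
      retorno ++ [String.ofList [Char.ofNat ((PySem.List.pyGetD cs f ' ').toNat - 1)]]
    else
      retorno ++ [String.ofList [PySem.List.pyGetD cs f ' ']]) []

-- ===== PORT B =====
-- port of B: shift all characters by a map, then a second loop over range(len//2)
-- overwrites the first half with the original characters (retorno[i] = frase[i]).
-- i ranges over nonnegative ints, so .toNat is exact for the list update.
def terceiro_alt (frase : String) : List String :=
  let cs := frase.toList
  let retorno := cs.map (fun c => String.ofList [Char.ofNat (c.toNat - 1)])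
  (PySem.List.pyRange 0 (PySem.Int.floordiv (cs.length : Int) 2) 1).foldl
    (fun out i => out.set i.toNat (String.ofList [PySem.List.pyGetD cs i ' '])) retorno

-- ===== PRECONDITION & SPEC =====
def Spec_terceiro (frase : String) (out : List String) : Prop := out = terceiro_alt frase
instance (frase : String) (out : List String) : Decidable (Spec_terceiro frase out) := by unfold Spec_terceiro; infer_instance

-- ===== CLAIM =====
def Claim_equal_terceiro : Prop := ∀ (frase : String), Dom_terceiro frase → Spec_terceiro frase (terceiro frase)

-- ===== LEMMAS AND PROOFS =====

-- a fold of in-place updates over range m keeps the length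
theorem setfold_length {α : Type} (g : Nat → α) (m : Nat) (out : List α) :
    ((List.range m).foldl (fun o i => o.set i (g i)) out).length = out.length := by
  induction m generalizing out with
  | zero => rfl
  | succ m ih =>
    rw [List.range_succ, List.foldl_append]
    simp [ih]

-- elementwise characterisation of the update fold
theorem setfold_get? {α : Type} (g : Nat → α) (m : Nat) (out : List α) (j : Nat) :
    ((List.range m).foldl (fun o i => o.set i (g i)) out)[j]? =
      if j < m then (if j < out.length then some (g j) else none) else out[j]? := by
  induction m generalizing out with
  | zero => simp
  | succ m ih =>
    rw [List.range_succ, List.foldl_append]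
    simp only [List.foldl_cons, List.foldl_nil]
    rw [List.getElem?_set, setfold_length, ih]
    by_cases hm : m = j
    · subst hm; simp
    · rw [if_neg hm]
      by_cases hlt : j < m
      · rw [if_pos hlt, if_pos (Nat.lt_succ_of_lt hlt)]
      · rw [if_neg hlt, if_neg (by omega)]

-- the two ports agree on the underlying character list
theorem terceiro_core (cs : List Char) :
    (PySem.List.pyRange 0 (cs.length : Int) 1).foldl (fun retorno f =>
      if f ≥ PySem.Int.floordiv (cs.length : Int) 2 then
        retorno ++ [String.ofList [Char.ofNat ((PySem.List.pyGetD cs f ' ').toNat - 1)]]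
      else
        retorno ++ [String.ofList [PySem.List.pyGetD cs f ' ']]) []
    = (PySem.List.pyRange 0 (PySem.Int.floordiv (cs.length : Int) 2) 1).foldl
        (fun out i => out.set i.toNat (String.ofList [PySem.List.pyGetD cs i ' ']))
        (cs.map (fun c => String.ofList [Char.ofNat (c.toNat - 1)])) := by
  -- A side: rewrite the appending fold as a map over indices
  have hbody : (fun (retorno : List String) (f : Int) =>
      if f ≥ PySem.Int.floordiv (cs.length : Int) 2 then
        retorno ++ [String.ofList [Char.ofNat ((PySem.List.pyGetD cs f ' ').toNat - 1)]]
      else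
        retorno ++ [String.ofList [PySem.List.pyGetD cs f ' ']])
      = fun retorno f => retorno ++
          [if f ≥ PySem.Int.floordiv (cs.length : Int) 2 then
              String.ofList [Char.ofNat ((PySem.List.pyGetD cs f ' ').toNat - 1)]
            else String.ofList [PySem.List.pyGetD cs f ' ']] := by
    funext retorno f
    by_cases h : f ≥ PySem.Int.floordiv (cs.length : Int) 2
    · rw [if_pos h, if_pos h]
    · rw [if_neg h, if_neg h]
  have hmid : PySem.Int.floordiv (cs.length : Int) 2 = ((cs.length / 2 : Nat) : Int) := by
    exact_mod_cast PySem.Int.floordiv_natCast cs.length 2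
  rw [hbody, PySem.List.foldl_append_singleton_eq_map, PySem.List.pyRange_zero_natCast, hmid,
    PySem.List.pyRange_zero_natCast, List.foldl_map]
  simp only [Int.toNat_natCast]
  apply List.ext_getElem?
  intro i
  rw [setfold_get? (fun i => String.ofList [PySem.List.pyGetD cs (i : Int) ' ']) (cs.length / 2)]
  simp only [List.nil_append, List.getElem?_map, List.length_map]
  by_cases hi : i < cs.length
  · rw [List.getElem?_eq_getElem (by simpa using hi : i < (List.range cs.length).length)]
    simp only [List.getElem_range, Option.map_some, PySem.List.pyGetD_natCast,
      List.getD_eq_getElem cs ' ' hi]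
    by_cases hcase : i < cs.length / 2
    · have h1 : ¬ (((i : Nat) : Int) ≥ ((cs.length / 2 : Nat) : Int)) := by
        simp only [ge_iff_le, Nat.cast_le]; omega
      rw [if_neg h1, if_pos hcase, if_pos hi]
    · have h1 : (((i : Nat) : Int) ≥ ((cs.length / 2 : Nat) : Int)) := by
        simp only [ge_iff_le, Nat.cast_le]; omega
      rw [if_pos h1, if_neg hcase]
      simp [List.getElem?_eq_getElem hi]
  · rw [if_neg (by omega : ¬ i < cs.length / 2),
      List.getElem?_eq_none (by simpa using Nat.le_of_not_lt hi),
      List.getElem?_eq_none (Nat.le_of_not_lt hi)]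
    simp

-- ===== VERDICT =====
theorem terceiro_spec : Claim_equal_terceiro := by
  intro frase _
  unfold Spec_terceiro terceiro terceiro_alt
  exact terceiro_core frase.toList
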